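-- pv_equiv track=rewrite | github.com/David-5-5/tutorial | python/algo/202503/algo1027.py | longestArithSeqLength2
-- ===== SOURCE A (Python) =====
-- from typing import List
--
-- def longestArithSeqLength2(nums: List[int]) -> int:
--     ans = 2
--     mx, mn = max(nums), min(nums)
--
--     for d in range((mn-mx)//2, (mx-mn)//2+1):  # 枚举方差
--         dp = [0] * (mx + 1)
--         for x in nums:  # 数组代替map，时间复杂度一样，性能极大提升
--             dp[x] = dp[x-d] + 1 if 0 <= x - d <= mx else 1
--             if dp[x] > ans: ans = dp[x]
--
--     return ans
-- ===== SOURCE B (Python) =====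
-- # Single-pass O(n^2) DP: for each value keep {difference: longest chain ending there},
-- # instead of rescanning the whole list once per candidate difference.
-- def longestArithSeqLength2(nums):
--     mx, mn = max(nums), min(nums)
--     # A chain of length >= 3 fits inside [mn, mx], so its difference d satisfies
--     # 2*|d| <= mx - mn; chains of length 2 never beat the baseline answer of 2.
--     lo, hi = (mn - mx) // 2, (mx - mn) // 2
--     ans = 2
--     best = {}  # value -> {d: length of the longest chain with difference d ending at that value}
--     for x in nums:
--         row = {}
--         for v, chains in best.items():
--             d = x - v
--             if lo <= d <= hi:
--                 length = chains.get(d, 1) + 1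
--                 row[d] = length
--                 if length > ans:
--                     ans = length
--         best[x] = row
--     return ans
-- ===== Notes on version B (the rewrite author's own statement) =====
-- stated objective: alternative
-- what changed: A rebuilds a value-indexed array of size max+1 and rescans the whole list once for every candidate difference d in [(mn-mx)//2,(mx-mn)//2]; B makes a single pass keeping, per distinct value, a dict {difference: chain length} for its most recent occurrence, combining each element once with each previously seen value. Pre_ restricts to nonempty lists of nonnegative integers, the natural domain of A's value-indexed dp array: a negative element either raises IndexError or is silently stored in another value's slot by Python's negative-index wraparound. …
-- outside the precondition, e.g. on longestArithSeqLength2([3, 1, -1, 1]): A returns 4, B returns 3; on longestArithSeqLength2([-5, -3, -1]): A raises IndexError, B returns 3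
-- crash fix: On nonempty lists whose maximum is negative, or whose minimum is below -(max+1), A raises IndexError (its dp array is too short for the wrapped index) while B returns the longest-arithmetic-subsequence length, e.g. 3 on [-5,-3,-1]. — e.g. on longestArithSeqLength2([-5, -3, -1]): A raises IndexError, B returns 3
import Mathlib
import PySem

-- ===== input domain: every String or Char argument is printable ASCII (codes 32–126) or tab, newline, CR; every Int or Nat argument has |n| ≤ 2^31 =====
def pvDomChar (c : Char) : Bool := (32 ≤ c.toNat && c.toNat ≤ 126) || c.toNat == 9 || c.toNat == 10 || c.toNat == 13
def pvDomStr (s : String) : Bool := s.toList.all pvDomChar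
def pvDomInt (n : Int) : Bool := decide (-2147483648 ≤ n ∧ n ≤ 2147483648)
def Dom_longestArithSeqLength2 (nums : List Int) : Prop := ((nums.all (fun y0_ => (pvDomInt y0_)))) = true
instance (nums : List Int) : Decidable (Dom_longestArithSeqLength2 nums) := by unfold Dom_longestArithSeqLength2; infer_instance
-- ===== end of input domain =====

-- B replaces A's per-difference rescans over a value-indexed array by one pass keeping a
-- {difference: chain length} dict per distinct value; same return value on nonempty
-- lists of nonnegative integers (Pre_), the natural domain of A's value-indexed dp array.

-- shared helpers: max(nums) / min(nums) (Python raises ValueError on [], excluded by Pre_)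
def pvMaxv (nums : List Int) : Int := (PySem.List.max? nums (fun y => y)).getD 0
def pvMinv (nums : List Int) : Int := (PySem.List.min? nums (fun y => y)).getD 0

-- ===== PORT A =====
def longestArithSeqLength2 (nums : List Int) : Int :=
  let mx : Int := pvMaxv nums
  let mn : Int := pvMinv nums
  (PySem.List.pyRange (PySem.Int.floordiv (mn - mx) 2) (PySem.Int.floordiv (mx - mn) 2 + 1) 1).foldl
    (fun ans d =>
      (nums.foldl
        (fun (st : List Int × Int) x =>
          let v : Int := if 0 ≤ x - d ∧ x - d ≤ mx then PySem.List.pyGetD st.1 (x - d) 0 + 1 else 1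
          let dp' := PySem.List.pySetD st.1 x v        -- dp[x] = v  (IndexError excluded by Pre_)
          let cur := PySem.List.pyGetD dp' x 0         -- the dp[x] of 'if dp[x] > ans'
          (dp', if cur > st.2 then cur else st.2))
        (List.replicate (mx + 1).toNat (0 : Int), ans)).2)
    2

-- ===== PORT B =====
def longestArithSeqLength2_alt (nums : List Int) : Int :=
  let mx : Int := pvMaxv nums
  let mn : Int := pvMinv nums
  let lo : Int := PySem.Int.floordiv (mn - mx) 2
  let hi : Int := PySem.Int.floordiv (mx - mn) 2
  (nums.foldl
    (fun (st : PySem.Dict Int (PySem.Dict Int Int) × Int) x =>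
      let ra := st.1.items.foldl
        (fun (ra : PySem.Dict Int Int × Int) vp =>
          let d := x - vp.1
          if lo ≤ d ∧ d ≤ hi then
            let v := vp.2.getD d 1 + 1
            (ra.1.insert d v, if v > ra.2 then v else ra.2)
          else ra)
        (PySem.Dict.empty, st.2)
      (st.1.insert x ra.1, ra.2))
    (PySem.Dict.empty, 2)).2

-- ===== PRECONDITION & SPEC =====
-- Pre_ restricts to the natural domain of A's value-indexed dp array: nonempty lists
-- (max/min of [] raises ValueError) of NONNEGATIVE integers — a negative element either
-- raises IndexError (below -(max+1)) or is silently stored in another value's dp slot by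
-- Python's negative-index wraparound, behaviour outside the algorithm's natural domain.
def Pre_longestArithSeqLength2 (nums : List Int) : Prop :=
  nums ≠ [] ∧ ∀ x ∈ nums, 0 ≤ x
instance (nums : List Int) : Decidable (Pre_longestArithSeqLength2 nums) := by
  unfold Pre_longestArithSeqLength2; infer_instance

def pvWitness_longestArithSeqLength2 : List Int := [0, 1, 2, 4]

-- On nonempty lists whose maximum is negative, or whose minimum is below -(max+1),
-- A raises IndexError (its dp array is too short for the wrapped index) while B returns
-- the longest-arithmetic-subsequence answer.
def Raises_longestArithSeqLength2 (nums : List Int) : Prop :=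
  nums ≠ [] ∧ (pvMaxv nums < 0 ∨ pvMinv nums < -(pvMaxv nums + 1))
instance (nums : List Int) : Decidable (Raises_longestArithSeqLength2 nums) := by
  unfold Raises_longestArithSeqLength2; infer_instance

def pvRaiseWitness_longestArithSeqLength2 : List Int := [-5, -3, -1]
def pvRaiseWitnessOut_longestArithSeqLength2 : Int := 3

def Spec_longestArithSeqLength2 (nums : List Int) (out : Int) : Prop :=
  out = longestArithSeqLength2_alt nums
instance (nums : List Int) (out : Int) : Decidable (Spec_longestArithSeqLength2 nums out) := by
  unfold Spec_longestArithSeqLength2; infer_instance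

-- ===== CLAIM (what is proved, stated in full; the proofs are below) =====
def Claim_equal_longestArithSeqLength2 : Prop := ∀ (nums : List Int), Dom_longestArithSeqLength2 nums → Pre_longestArithSeqLength2 nums → Spec_longestArithSeqLength2 nums (longestArithSeqLength2 nums)

def Claim_raises_longestArithSeqLength2 : Prop := (∀ (nums : List Int), Dom_longestArithSeqLength2 nums → Raises_longestArithSeqLength2 nums → ¬ Pre_longestArithSeqLength2 nums) ∧ (Dom_longestArithSeqLength2 (pvRaiseWitness_longestArithSeqLength2) ∧ Raises_longestArithSeqLength2 (pvRaiseWitness_longestArithSeqLength2) ∧ longestArithSeqLength2_alt (pvRaiseWitness_longestArithSeqLength2) = pvRaiseWitnessOut_longestArithSeqLength2)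

-- ===== LEMMAS AND PROOFS =====

-- ---- the common abstract layer: one per-difference chain pass over values ----

-- chain value of element x for difference d, given chain values f per value so far
def pvStepV (mx d : Int) (f : Int → Int) (x : Int) : Int :=
  if 0 ≤ x - d ∧ x - d ≤ mx then f (x - d) + 1 else 1

-- f updated at x (the slot dp[x] writes for nonnegative x)
def pvStepF (mx d : Int) (f : Int → Int) (x : Int) : Int → Int :=
  fun s => if s = x then pvStepV mx d f x else f s

def pvPass (mx d : Int) (p : List Int) (fa : (Int → Int) × Int) : (Int → Int) × Int :=
  p.foldl (fun st x => (pvStepF mx d st.1 x, max st.2 (pvStepV mx d st.1 x))) fa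

def pvF (mx d : Int) (p : List Int) : Int → Int := (pvPass mx d p ((fun _ => 0), 1)).1

-- best chain value of the d-pass over p (1 on the empty prefix)
def pvW (mx d : Int) (p : List Int) : Int := (pvPass mx d p ((fun _ => 0), 1)).2

theorem pvMaxIf (a v : Int) : (if v > a then v else a) = max a v := by
  rcases le_total v a with h | h
  · simp [not_lt.mpr h, max_eq_left h]
  · rcases lt_or_eq_of_le h with h' | h'
    · simp [h', max_eq_right h]
    · simp [h']

theorem pvPass_fst (mx d : Int) (p : List Int) :
    ∀ (f : Int → Int) (a : Int), (pvPass mx d p (f, a)).1 = p.foldl (pvStepF mx d) f := by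
  induction p with
  | nil => intro f a; rfl
  | cons x t ih => intro f a; simpa [pvPass, List.foldl] using ih _ _

theorem pvPass_max (mx d : Int) (p : List Int) :
    ∀ (f : Int → Int) (a b : Int),
      (pvPass mx d p (f, max a b)).2 = max a (pvPass mx d p (f, b)).2 := by
  induction p with
  | nil => intro f a b; rfl
  | cons x t ih =>
      intro f a b
      simp only [pvPass, List.foldl] at *
      rw [max_assoc]
      exact ih _ _ _

theorem pvPass_snd (mx d : Int) (p : List Int) (f : Int → Int) (a : Int) (ha : 1 ≤ a) :
    (pvPass mx d p (f, a)).2 = max a (pvPass mx d p (f, 1)).2 := by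
  conv_lhs => rw [show a = max a 1 from (max_eq_left ha).symm]
  exact pvPass_max mx d p f a 1

theorem pvPass_append (mx d : Int) (p : List Int) (x : Int) (fa : (Int → Int) × Int) :
    pvPass mx d (p ++ [x]) fa
      = ((pvStepF mx d (pvPass mx d p fa).1 x),
         max (pvPass mx d p fa).2 (pvStepV mx d (pvPass mx d p fa).1 x)) := by
  simp [pvPass, List.foldl_append]

theorem pvStepF_nonneg (mx d : Int) (f : Int → Int) (x : Int) (hf : ∀ s, 0 ≤ f s) :
    ∀ s, 0 ≤ pvStepF mx d f x s := by
  intro s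
  unfold pvStepF pvStepV
  split_ifs with h1 h2
  · have := hf (x - d); omega
  · omega
  · exact hf s

theorem pvF_eq_foldl (mx d : Int) (p : List Int) : pvF mx d p = p.foldl (pvStepF mx d) (fun _ => 0) :=
  pvPass_fst mx d p _ _

theorem pvF_append (mx d : Int) (p : List Int) (x : Int) :
    pvF mx d (p ++ [x]) = pvStepF mx d (pvF mx d p) x := by
  unfold pvF
  rw [pvPass_append]

theorem pvW_append (mx d : Int) (p : List Int) (x : Int) :
    pvW mx d (p ++ [x]) = max (pvW mx d p) (pvStepV mx d (pvF mx d p) x) := by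
  unfold pvW pvF
  rw [pvPass_append]

theorem pvF_unwritten (mx d : Int) (p : List Int) :
    ∀ (f : Int → Int) (s : Int), (∀ x ∈ p, x ≠ s) →
      p.foldl (pvStepF mx d) f s = f s := by
  induction p with
  | nil => intro f s _; rfl
  | cons x t ih =>
      intro f s h
      rw [List.foldl_cons, ih _ _ (fun y hy => h y (by simp [hy]))]
      unfold pvStepF
      rw [if_neg (fun hs => h x (by simp) hs.symm)]

-- ---- generic max-fold bounds ----

theorem pvWfold_le (l : List Int) (w : Int → Int) :
    ∀ (a C : Int), a ≤ C → (∀ d ∈ l, w d ≤ C) →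
      l.foldl (fun a d => max a (w d)) a ≤ C := by
  induction l with
  | nil => intro a C h _; simpa using h
  | cons y t ih =>
      intro a C h hw
      exact ih _ _ (max_le h (hw y (by simp))) (fun d hd => hw d (by simp [hd]))

theorem pvWfold_base (l : List Int) (w : Int → Int) :
    ∀ (a : Int), a ≤ l.foldl (fun a d => max a (w d)) a := by
  induction l with
  | nil => intro a; simp
  | cons y t ih =>
      intro a
      exact le_trans (le_max_left a (w y)) (ih _)

theorem pvWfold_mem (l : List Int) (w : Int → Int) :
    ∀ (a : Int) {d : Int}, d ∈ l → w d ≤ l.foldl (fun a d => max a (w d)) a := by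
  induction l with
  | nil => intro a d hd; simp at hd
  | cons y t ih =>
      intro a d hd
      rcases List.mem_cons.mp hd with rfl | hd
      · exact le_trans (le_max_right a (w d)) (pvWfold_base t w _)
      · exact ih _ hd

theorem pvWfold_mono (l : List Int) (w w' : Int → Int) :
    ∀ (a a' : Int), a ≤ a' → (∀ d ∈ l, w d ≤ w' d) →
      l.foldl (fun a d => max a (w d)) a ≤ l.foldl (fun a d => max a (w' d)) a' := by
  induction l with
  | nil => intro a a' h _; simpa using h
  | cons y t ih =>
      intro a a' h hw
      exact ih _ _ (max_le_max h (hw y (by simp))) (fun d hd => hw d (by simp [hd]))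

theorem pvWfold_const (l : List Int) (w : Int → Int) (a : Int) (h : ∀ d ∈ l, w d ≤ a) :
    l.foldl (fun a d => max a (w d)) a = a :=
  le_antisymm (pvWfold_le l w a a le_rfl h) (pvWfold_base l w a)

-- ---- generic conditional max-fold (B's inner ans accumulation) ----

theorem pvMfold_le {γ : Type} (l : List γ) (P : γ → Prop) [DecidablePred P] (g : γ → Int) :
    ∀ (a C : Int), a ≤ C → (∀ y ∈ l, P y → g y ≤ C) →
      l.foldl (fun a y => if P y then max a (g y) else a) a ≤ C := by
  induction l with
  | nil => intro a C h _; simpa using h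
  | cons y t ih =>
      intro a C h hg
      refine ih _ _ ?_ (fun z hz hP => hg z (by simp [hz]) hP)
      dsimp only
      split_ifs with hP
      · exact max_le h (hg y (by simp) hP)
      · exact h

theorem pvMfold_base {γ : Type} (l : List γ) (P : γ → Prop) [DecidablePred P] (g : γ → Int) :
    ∀ (a : Int), a ≤ l.foldl (fun a y => if P y then max a (g y) else a) a := by
  induction l with
  | nil => intro a; simp
  | cons y t ih =>
      intro a
      refine le_trans ?_ (ih _)
      dsimp only
      split_ifs
      · exact le_max_left _ _
      · exact le_rfl

theorem pvMfold_mem {γ : Type} (l : List γ) (P : γ → Prop) [DecidablePred P] (g : γ → Int) :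
    ∀ (a : Int) {y : γ}, y ∈ l → P y →
      g y ≤ l.foldl (fun a y => if P y then max a (g y) else a) a := by
  induction l with
  | nil => intro a y hy; simp at hy
  | cons z t ih =>
      intro a y hy hP
      rcases List.mem_cons.mp hy with rfl | hy
      · refine le_trans ?_ (pvMfold_base t P g _)
        dsimp only
        rw [if_pos hP]
        exact le_max_right _ _
      · exact ih _ hy hP

-- ---- B's inner fold, split into its row and ans components ----

def pvRowStep (lo hi x : Int) (r : PySem.Dict Int Int) (vp : Int × PySem.Dict Int Int) :
    PySem.Dict Int Int :=
  if lo ≤ x - vp.1 ∧ x - vp.1 ≤ hi then r.insert (x - vp.1) (vp.2.getD (x - vp.1) 1 + 1) else r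

def pvAnsStep (lo hi x : Int) (a : Int) (vp : Int × PySem.Dict Int Int) : Int :=
  if lo ≤ x - vp.1 ∧ x - vp.1 ≤ hi then
    (if vp.2.getD (x - vp.1) 1 + 1 > a then vp.2.getD (x - vp.1) 1 + 1 else a) else a

def pvInnerB (lo hi x : Int) (ra : PySem.Dict Int Int × Int) (vp : Int × PySem.Dict Int Int) :
    PySem.Dict Int Int × Int :=
  let d := x - vp.1
  if lo ≤ d ∧ d ≤ hi then
    let v := vp.2.getD d 1 + 1
    (ra.1.insert d v, if v > ra.2 then v else ra.2)
  else ra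

theorem pvInnerB_split (lo hi x : Int) (ra : PySem.Dict Int Int × Int)
    (vp : Int × PySem.Dict Int Int) :
    pvInnerB lo hi x ra vp = (pvRowStep lo hi x ra.1 vp, pvAnsStep lo hi x ra.2 vp) := by
  simp only [pvInnerB, pvRowStep, pvAnsStep]
  split_ifs <;> rfl

theorem pvBinner_eq (lo hi x : Int) (l : List (Int × PySem.Dict Int Int)) :
    ∀ (r : PySem.Dict Int Int) (a : Int),
      l.foldl (pvInnerB lo hi x) (r, a)
        = (l.foldl (pvRowStep lo hi x) r, l.foldl (pvAnsStep lo hi x) a) := by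
  induction l with
  | nil => intro r a; rfl
  | cons vp t ih =>
      intro r a
      simp only [List.foldl_cons, pvInnerB_split]
      exact ih _ _

theorem pvAnsStep_eq (lo hi x : Int) (a : Int) (vp : Int × PySem.Dict Int Int) :
    pvAnsStep lo hi x a vp
      = if lo ≤ x - vp.1 ∧ x - vp.1 ≤ hi then max a (vp.2.getD (x - vp.1) 1 + 1) else a := by
  unfold pvAnsStep
  rw [pvMaxIf]

-- ---- the row built by B for a new element x ----

theorem pvRowFold_ne (x lo hi : Int) (l : List (Int × PySem.Dict Int Int)) :
    ∀ (r : PySem.Dict Int Int) (d : Int), (∀ vp ∈ l, vp.1 ≠ x - d) →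
      (l.foldl (pvRowStep lo hi x) r).getD d 1 = r.getD d 1 := by
  induction l with
  | nil => intro r d _; rfl
  | cons vp t ih =>
      intro r d h
      rw [List.foldl_cons, ih _ _ (fun z hz => h z (by simp [hz]))]
      unfold pvRowStep
      split_ifs with hP
      · rw [PySem.Dict.getD_insert]
        rw [if_neg (fun hd => h vp (by simp) (by omega))]
      · rfl

theorem pvRowFold_mem (x lo hi : Int) (l : List (Int × PySem.Dict Int Int)) :
    ∀ (r : PySem.Dict Int Int) (d : Int) (prev : PySem.Dict Int Int),
      (l.map (·.1)).Nodup → (x - d, prev) ∈ l → lo ≤ d → d ≤ hi →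
      (l.foldl (pvRowStep lo hi x) r).getD d 1 = prev.getD d 1 + 1 := by
  induction l with
  | nil => intro r d prev _ h; simp at h
  | cons vp t ih =>
      intro r d prev hnd hmem hlo hhi
      simp only [List.map_cons, List.nodup_cons] at hnd
      rcases List.mem_cons.mp hmem with rfl | hmem
      · -- the head is (x - d, prev): its insert survives the tail
        have hxd : x - (x - d) = d := by omega
        have hstep : pvRowStep lo hi x r (x - d, prev) = r.insert d (prev.getD d 1 + 1) := by
          simp only [pvRowStep, hxd]
          rw [if_pos ⟨hlo, hhi⟩]
        rw [List.foldl_cons, hstep]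
        rw [pvRowFold_ne x lo hi t _ d (fun z hz hz1 => hnd.1 (by
              refine List.mem_map.mpr ⟨z, hz, ?_⟩
              simp [hz1]))]
        rw [PySem.Dict.getD_insert, if_pos rfl]
      · -- head key differs from x - d (nodup), recurse
        rw [List.foldl_cons]
        exact ih _ _ _ hnd.2 hmem hlo hhi

-- ---- the value-indexed array as a function on slots ----

-- dp is the value-indexed array, f the slot-content function it represents
def pvRep (mx : Int) (dp : List Int) (f : Int → Int) : Prop :=
  dp.length = (mx + 1).toNat ∧ ∀ s : Int, 0 ≤ s → s ≤ mx → PySem.List.pyGetD dp s 0 = f s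

theorem pvGetD_set (dp : List Int) (k : Nat) (v : Int) (s : Int) (hs : 0 ≤ s)
    (hk : k < dp.length) :
    PySem.List.pyGetD (dp.set k v) s 0 = if s.toNat = k then v else PySem.List.pyGetD dp s 0 := by
  rw [PySem.List.pyGetD_of_nonneg _ _ hs, PySem.List.pyGetD_of_nonneg _ _ hs]
  rw [List.getD_eq_getElem?_getD, List.getD_eq_getElem?_getD]
  rw [List.getElem?_set]
  by_cases h : s.toNat = k
  · rw [if_pos h, if_pos h.symm, if_pos (h ▸ hk)]
    rfl
  · rw [if_neg h, if_neg (fun he => h he.symm)]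

theorem pvRep_replicate (mx : Int) (_hmx : 0 ≤ mx) :
    pvRep mx (List.replicate (mx + 1).toNat (0 : Int)) (fun _ => 0) := by
  refine ⟨by simp, fun s h0 h1 => ?_⟩
  rw [PySem.List.pyGetD_of_nonneg _ _ h0, List.getD_eq_getElem?_getD, List.getElem?_replicate]
  split_ifs <;> rfl

-- ---- the two ports' step functions, named for the proofs ----

def pvStepA (mx d : Int) (st : List Int × Int) (x : Int) : List Int × Int :=
  let v : Int := if 0 ≤ x - d ∧ x - d ≤ mx then PySem.List.pyGetD st.1 (x - d) 0 + 1 else 1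
  let dp' := PySem.List.pySetD st.1 x v
  let cur := PySem.List.pyGetD dp' x 0
  (dp', if cur > st.2 then cur else st.2)

def pvStepB (lo hi : Int) (st : PySem.Dict Int (PySem.Dict Int Int) × Int) (x : Int) :
    PySem.Dict Int (PySem.Dict Int Int) × Int :=
  let ra := st.1.items.foldl (pvInnerB lo hi x) (PySem.Dict.empty, st.2)
  (st.1.insert x ra.1, ra.2)

-- ---- A's inner pass computes pvPass through the array representation ----

theorem pvApass (mx d : Int) (p : List Int) :
    ∀ (dp : List Int) (f : Int → Int) (a : Int),
      (∀ x ∈ p, 0 ≤ x ∧ x ≤ mx) → pvRep mx dp f → (∀ s, 0 ≤ f s) →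
      pvRep mx (p.foldl (pvStepA mx d) (dp, a)).1 (p.foldl (pvStepF mx d) f) ∧
        (p.foldl (pvStepA mx d) (dp, a)).2 = (pvPass mx d p (f, a)).2 := by
  induction p with
  | nil => intro dp f a _ hrep _; exact ⟨hrep, rfl⟩
  | cons x t ih =>
      intro dp f a hb hrep hf
      obtain ⟨hx1, hx2⟩ := hb x (List.mem_cons_self)
      obtain ⟨hlen, hget⟩ := hrep
      have hklt : x.toNat < dp.length := by omega
      have hv : (if 0 ≤ x - d ∧ x - d ≤ mx then PySem.List.pyGetD dp (x - d) 0 + 1 else 1)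
          = pvStepV mx d f x := by
        unfold pvStepV
        split_ifs with hg
        · rw [hget _ hg.1 hg.2]
        · rfl
      have hset : PySem.List.pySetD dp x (pvStepV mx d f x)
          = dp.set x.toNat (pvStepV mx d f x) :=
        PySem.List.pySetD_of_nonneg _ _ hx1
      have hcur : PySem.List.pyGetD (dp.set x.toNat (pvStepV mx d f x)) x 0
          = pvStepV mx d f x := by
        rw [pvGetD_set _ _ _ _ hx1 hklt, if_pos rfl]
      have hstep : pvStepA mx d (dp, a) x
          = (dp.set x.toNat (pvStepV mx d f x), max a (pvStepV mx d f x)) := by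
        simp only [pvStepA, hv, hset, hcur, pvMaxIf]
      have hrep' : pvRep mx (dp.set x.toNat (pvStepV mx d f x)) (pvStepF mx d f x) := by
        refine ⟨by simpa using hlen, fun s h0 h1 => ?_⟩
        rw [pvGetD_set _ _ _ _ h0 hklt]
        unfold pvStepF
        by_cases hsr : s = x
        · rw [if_pos (by omega), if_pos hsr]
        · rw [if_neg (by omega), if_neg hsr]
          exact hget _ h0 h1
      rw [List.foldl_cons, hstep]
      exact ih _ _ (max a (pvStepV mx d f x)) (fun y hy => hb y (List.mem_cons_of_mem _ hy))
        hrep' (pvStepF_nonneg mx d f x hf)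

theorem pvAouter (mx : Int) (nums : List Int) (R : List Int)
    (hmx : 0 ≤ mx) (hb : ∀ x ∈ nums, 0 ≤ x ∧ x ≤ mx) :
    ∀ (a : Int), 1 ≤ a →
      R.foldl (fun a d => (nums.foldl (pvStepA mx d) (List.replicate (mx + 1).toNat (0 : Int), a)).2) a
        = R.foldl (fun a d => max a (pvW mx d nums)) a := by
  induction R with
  | nil => intro a _; rfl
  | cons d R ih =>
      intro a ha
      simp only [List.foldl_cons]
      have h1 := (pvApass mx d nums _ (fun _ => 0) a hb (pvRep_replicate mx hmx)
        (fun _ => le_rfl)).2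
      rw [h1, pvPass_snd mx d nums _ a ha]
      exact ih (max a (pvW mx d nums)) (le_trans ha (le_max_left _ _))

-- ---- B's invariant ----

def pvInv (mx lo hi : Int) (p : List Int) (st : PySem.Dict Int (PySem.Dict Int Int) × Int) : Prop :=
  st.1.keys.Nodup ∧
  (∀ s : Int, s ∈ st.1.keys ↔ s ∈ p) ∧
  (∀ s prev, (s, prev) ∈ st.1.items → ∀ d : Int, lo ≤ d → d ≤ hi → prev.getD d 1 = pvF mx d p s) ∧
  st.2 = (PySem.List.pyRange lo (hi + 1) 1).foldl (fun a d => max a (pvW mx d p)) 2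

theorem pvBstep (mx lo hi : Int) (p : List Int) (x : Int)
    (hbp : ∀ y ∈ p, 0 ≤ y ∧ y ≤ mx)
    (st : PySem.Dict Int (PySem.Dict Int Int) × Int) (h : pvInv mx lo hi p st) :
    pvInv mx lo hi (p ++ [x]) (pvStepB lo hi st x) := by
  obtain ⟨hnd, hkeys, hitems, hans⟩ := h
  have hndm : (st.1.items.map (·.1)).Nodup := hnd
  have hkb : ∀ s ∈ st.1.keys, 0 ≤ s ∧ s ≤ mx := fun s hs => hbp s ((hkeys s).mp hs)
  -- the accumulated value of f at a value not yet seen is 0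
  have hF0 : ∀ (d s : Int), s ∉ st.1.keys → pvF mx d p s = 0 := by
    intro d s hs
    rw [pvF_eq_foldl]
    exact pvF_unwritten mx d p _ s (fun y hy hys => hs ((hkeys s).mpr (hys ▸ hy)))
  -- getD of the rows of st.1, phrased through keys
  have hrowval : ∀ (d : Int), lo ≤ d → d ≤ hi → (x - d) ∈ st.1.keys →
      ∃ prev, (x - d, prev) ∈ st.1.items ∧ prev.getD d 1 = pvF mx d p (x - d) := by
    intro d hlo hhi hk
    obtain ⟨vp, hvp, hfst⟩ := List.mem_map.mp hk
    exact ⟨vp.2, by rwa [show (x - d, vp.2) = vp by ext <;> simp [hfst]], by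
      rw [← hfst] at *
      exact hitems vp.1 vp.2 (by rwa [show (vp.1, vp.2) = vp by ext <;> rfl]) d hlo hhi⟩
  -- the new element's chain value for difference d
  have hstepV : ∀ (d : Int), lo ≤ d → d ≤ hi → (x - d) ∉ st.1.keys →
      0 ≤ x - d → x - d ≤ mx → pvStepV mx d (pvF mx d p) x = 1 := by
    intro d _ _ hk h0 h1
    unfold pvStepV
    rw [if_pos ⟨h0, h1⟩, hF0 d _ hk]
    norm_num
  unfold pvStepB
  rw [pvBinner_eq]
  set row := st.1.items.foldl (pvRowStep lo hi x) PySem.Dict.empty with hrow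
  set ansNew := st.1.items.foldl (pvAnsStep lo hi x) st.2 with hansNew
  refine ⟨PySem.Dict.nodup_keys_insert _ _ _ hnd, ?_, ?_, ?_⟩
  · -- keys of the new dict are the values of p ++ [x]
    intro s
    rw [PySem.Dict.mem_keys_insert, hkeys s]
    constructor
    · rintro (rfl | hs)
      · simp
      · simp [hs]
    · intro hs
      rcases List.mem_append.mp hs with hs | hs
      · exact Or.inr hs
      · simp at hs
        exact Or.inl hs
  · -- every stored row gives the pass value of its value
    intro s prev hmem d hlo hhi
    rcases (PySem.Dict.mem_items_insert _ _ _ _).mp hmem with heq | ⟨hold, hne⟩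
    · -- the freshly inserted row at value x
      obtain ⟨hs, hprev⟩ := Prod.ext_iff.mp heq
      simp only at hs hprev
      subst hprev
      rw [hs, hrow, pvF_append]
      unfold pvStepF
      rw [if_pos rfl]
      by_cases hk : (x - d) ∈ st.1.keys
      · obtain ⟨prev0, hmem0, hval⟩ := hrowval d hlo hhi hk
        rw [pvRowFold_mem x lo hi st.1.items _ d prev0 hndm hmem0 hlo hhi, hval]
        obtain ⟨hb0, hb1⟩ := hkb _ hk
        unfold pvStepV
        rw [if_pos ⟨by omega, by omega⟩]
      · rw [pvRowFold_ne x lo hi st.1.items _ d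
          (fun vp hvp hfst => hk (hfst ▸ List.mem_map.mpr ⟨vp, hvp, rfl⟩))]
        rw [PySem.Dict.getD_empty]
        unfold pvStepV
        split_ifs with hg
        · rw [hF0 d _ hk]
          norm_num
        · rfl
    · -- an old row at a value ≠ x
      rw [hitems s prev hold d hlo hhi, pvF_append]
      unfold pvStepF
      rw [if_neg (by simpa using hne)]
  · -- the running answer equals the per-difference maxima over p ++ [x]
    have hmf : ansNew = st.1.items.foldl
        (fun a vp => if lo ≤ x - vp.1 ∧ x - vp.1 ≤ hi then max a (vp.2.getD (x - vp.1) 1 + 1) else a)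
        st.2 :=
      PySem.List.foldl_congr_mem _ _ _ _ (fun acc vp _ => pvAnsStep_eq lo hi x acc vp)
    show ansNew = _
    refine le_antisymm ?_ ?_
    · rw [hmf]
      refine pvMfold_le _ _ _ st.2 _ ?_ ?_
      · rw [hans]
        exact pvWfold_mono _ _ _ 2 2 le_rfl
          (fun d _ => pvW_append mx d p x ▸ le_max_left _ _)
      · rintro vp hvp ⟨h1, h2⟩
        have hk : vp.1 ∈ st.1.keys := List.mem_map.mpr ⟨vp, hvp, rfl⟩
        obtain ⟨hb0, hb1⟩ := hkb _ hk
        have hval : vp.2.getD (x - vp.1) 1 = pvF mx (x - vp.1) p vp.1 :=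
          hitems vp.1 vp.2 (by rwa [show (vp.1, vp.2) = vp by ext <;> rfl]) _ h1 h2
        have hsv : pvStepV mx (x - vp.1) (pvF mx (x - vp.1) p) x
            = vp.2.getD (x - vp.1) 1 + 1 := by
          unfold pvStepV
          rw [if_pos ⟨by omega, by omega⟩, show x - (x - vp.1) = vp.1 by omega, hval]
        calc vp.2.getD (x - vp.1) 1 + 1
            = pvStepV mx (x - vp.1) (pvF mx (x - vp.1) p) x := hsv.symm
          _ ≤ pvW mx (x - vp.1) (p ++ [x]) := by
              rw [pvW_append]; exact le_max_right _ _
          _ ≤ _ := pvWfold_mem _ _ 2 (PySem.List.mem_pyRange_one.mpr ⟨h1, by omega⟩)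
    · refine pvWfold_le _ _ 2 _ ?_ ?_
      · calc (2 : Int) ≤ st.2 := hans ▸ pvWfold_base _ _ 2
          _ ≤ ansNew := by rw [hmf]; exact pvMfold_base _ _ _ st.2
      · intro d hd
        obtain ⟨hlo', hd'⟩ := PySem.List.mem_pyRange_one.mp hd
        have hhi' : d ≤ hi := by omega
        rw [pvW_append]
        have hst2 : st.2 ≤ ansNew := by rw [hmf]; exact pvMfold_base _ _ _ st.2
        have h2a : (2 : Int) ≤ ansNew := le_trans (hans ▸ pvWfold_base _ _ 2) hst2
        refine max_le ?_ ?_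
        · exact le_trans (hans ▸ pvWfold_mem _ _ 2 hd) hst2
        · by_cases hg : 0 ≤ x - d ∧ x - d ≤ mx
          · by_cases hk : (x - d) ∈ st.1.keys
            · obtain ⟨prev0, hmem0, hval⟩ := hrowval d hlo' hhi' hk
              have hxd : x - (x - d) = d := by omega
              have hsv : pvStepV mx d (pvF mx d p) x = prev0.getD d 1 + 1 := by
                unfold pvStepV
                rw [if_pos hg, hval]
              rw [hsv, hmf]
              have := pvMfold_mem st.1.items
                (fun vp => lo ≤ x - vp.1 ∧ x - vp.1 ≤ hi)
                (fun vp => vp.2.getD (x - vp.1) 1 + 1) st.2 hmem0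
                (by simp only [hxd]; exact ⟨hlo', hhi'⟩)
              simpa [hxd] using this
            · rw [hstepV d hlo' hhi' hk hg.1 hg.2]
              omega
          · have : pvStepV mx d (pvF mx d p) x = 1 := by
              unfold pvStepV
              rw [if_neg hg]
            rw [this]
            omega

theorem pvBfold (mx lo hi : Int) :
    ∀ (q p : List Int), (∀ y ∈ p ++ q, 0 ≤ y ∧ y ≤ mx) →
      ∀ (st : PySem.Dict Int (PySem.Dict Int Int) × Int),
      pvInv mx lo hi p st → pvInv mx lo hi (p ++ q) (q.foldl (pvStepB lo hi) st) := by
  intro q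
  induction q with
  | nil => intro p hb st h; simpa using h
  | cons x t ih =>
      intro p hb st h
      have hb' : ∀ y ∈ (p ++ [x]) ++ t, 0 ≤ y ∧ y ≤ mx := by
        intro y hy
        apply hb
        simpa using hy
      have := ih (p ++ [x]) hb' _
        (pvBstep mx lo hi p x (fun y hy => hb y (by simp [hy])) st h)
      simpa using this

theorem pvInv_nil (mx lo hi : Int) :
    pvInv mx lo hi [] (PySem.Dict.empty, 2) := by
  refine ⟨PySem.Dict.nodup_keys_empty, ?_, ?_, ?_⟩
  · intro s
    simp [PySem.Dict.keys_empty]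
  · intro s prev hmem
    simp only [PySem.Dict.empty] at hmem
    simp at hmem
  · exact (pvWfold_const _ _ 2 (fun d _ => by norm_num [pvW, pvPass])).symm

theorem pvMax_ge (nums : List Int) (hne : nums ≠ []) : ∀ x ∈ nums, x ≤ pvMaxv nums := by
  intro x hx
  cases hm : PySem.List.max? nums (fun y => y) with
  | none => exact absurd ((PySem.List.max?_eq_none_iff _ _).mp hm) hne
  | some m =>
      have := PySem.List.max?_isMax hm x hx
      simpa [pvMaxv, hm] using this

-- ===== VERDICT (by name: the statement is the Claim_ definition above) =====
theorem longestArithSeqLength2_spec : Claim_equal_longestArithSeqLength2 := by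
  intro nums _ hpre
  obtain ⟨hne, hpos⟩ := hpre
  unfold Spec_longestArithSeqLength2
  have hmax := pvMax_ge nums hne
  obtain ⟨x0, hx0⟩ := List.exists_mem_of_ne_nil nums hne
  have hmx : 0 ≤ pvMaxv nums := le_trans (hpos x0 hx0) (hmax x0 hx0)
  have hbb : ∀ x ∈ nums, 0 ≤ x ∧ x ≤ pvMaxv nums :=
    fun x hx => ⟨hpos x hx, hmax x hx⟩
  have hA : longestArithSeqLength2 nums
      = (PySem.List.pyRange (PySem.Int.floordiv (pvMinv nums - pvMaxv nums) 2)
          (PySem.Int.floordiv (pvMaxv nums - pvMinv nums) 2 + 1) 1).foldl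
          (fun a d => max a (pvW (pvMaxv nums) d nums)) 2 := by
    show (PySem.List.pyRange (PySem.Int.floordiv (pvMinv nums - pvMaxv nums) 2)
          (PySem.Int.floordiv (pvMaxv nums - pvMinv nums) 2 + 1) 1).foldl
        (fun ans d => (nums.foldl (pvStepA (pvMaxv nums) d)
          (List.replicate (pvMaxv nums + 1).toNat (0 : Int), ans)).2) 2 = _
    exact pvAouter (pvMaxv nums) nums _ hmx hbb 2 (by norm_num)
  have hInv := pvBfold (pvMaxv nums) (PySem.Int.floordiv (pvMinv nums - pvMaxv nums) 2)
      (PySem.Int.floordiv (pvMaxv nums - pvMinv nums) 2) nums [] (by simpa using hbb)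
      (PySem.Dict.empty, 2) (pvInv_nil _ _ _)
  have hB : longestArithSeqLength2_alt nums
      = (PySem.List.pyRange (PySem.Int.floordiv (pvMinv nums - pvMaxv nums) 2)
          (PySem.Int.floordiv (pvMaxv nums - pvMinv nums) 2 + 1) 1).foldl
          (fun a d => max a (pvW (pvMaxv nums) d nums)) 2 := by
    show (nums.foldl (pvStepB (PySem.Int.floordiv (pvMinv nums - pvMaxv nums) 2)
          (PySem.Int.floordiv (pvMaxv nums - pvMinv nums) 2)) (PySem.Dict.empty, 2)).2 = _
    simpa using hInv.2.2.2
  rw [hA, hB]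

@[simp] theorem longestArithSeqLength2_raises : Claim_raises_longestArithSeqLength2 := by
  unfold Claim_raises_longestArithSeqLength2
  refine ⟨?_, by decide⟩
  rintro nums _ ⟨hne, hcase⟩ ⟨_, hpos⟩
  obtain ⟨x0, hx0⟩ := List.exists_mem_of_ne_nil nums hne
  have hmx : 0 ≤ pvMaxv nums := le_trans (hpos x0 hx0) (pvMax_ge nums hne x0 hx0)
  have hmn : 0 ≤ pvMinv nums := by
    cases hm : PySem.List.min? nums (fun y => y) with
    | none => exact absurd ((PySem.List.min?_eq_none_iff _ _).mp hm) hne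
    | some m =>
        have hmem := PySem.List.min?_mem hm
        have := hpos m hmem
        simpa [pvMinv, hm] using this
  rcases hcase with h | h <;> omega
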